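-- pv_equiv track=rewrite | github.com/MankyDanky/leetcode-practice | target_matrix_rotations.py | findRotation
-- ===== SOURCE A (Python) =====
-- from typing import List
--
-- def findRotation(mat: List[List[int]], target: List[List[int]]) -> bool:
--     n = len(mat)
--
--     def rotate(mat):
--         newMat = []
--         for j in range(n):
--             curr = []
--             for i in range(n):
--                 curr.append(mat[i][j])
--             curr.reverse()
--             newMat.append(curr)
--         return newMat
--
--     for i in range(4):
--         mat = rotate(mat)
--         if mat == target:
--             return True
--     return False
-- ===== SOURCE B (Python) =====
-- from typing import List
--
-- def findRotation(mat: List[List[int]], target: List[List[int]]) -> bool: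
--     n = len(mat)
--     if len(target) != n or any(len(row) != n for row in target):
--         return False
--     rotations = [
--         lambda i, j: mat[i][j],              # 0 degrees
--         lambda i, j: mat[n - 1 - j][i],      # 90 degrees clockwise
--         lambda i, j: mat[n - 1 - i][n - 1 - j],  # 180 degrees
--         lambda i, j: mat[j][n - 1 - i],      # 270 degrees
--     ]
--     return any(
--         all(target[i][j] == f(i, j) for i in range(n) for j in range(n))
--         for f in rotations
--     )
-- ===== Notes on version B (the rewrite author's own statement) =====
-- stated objective: simpler
-- what changed: B never builds rotated matrices: it checks target's shape once and then compares target directly against mat through the four rotation index formulas, instead of A's repeated column-by-column reconstruction and whole-matrix equality tests.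
import Mathlib
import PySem

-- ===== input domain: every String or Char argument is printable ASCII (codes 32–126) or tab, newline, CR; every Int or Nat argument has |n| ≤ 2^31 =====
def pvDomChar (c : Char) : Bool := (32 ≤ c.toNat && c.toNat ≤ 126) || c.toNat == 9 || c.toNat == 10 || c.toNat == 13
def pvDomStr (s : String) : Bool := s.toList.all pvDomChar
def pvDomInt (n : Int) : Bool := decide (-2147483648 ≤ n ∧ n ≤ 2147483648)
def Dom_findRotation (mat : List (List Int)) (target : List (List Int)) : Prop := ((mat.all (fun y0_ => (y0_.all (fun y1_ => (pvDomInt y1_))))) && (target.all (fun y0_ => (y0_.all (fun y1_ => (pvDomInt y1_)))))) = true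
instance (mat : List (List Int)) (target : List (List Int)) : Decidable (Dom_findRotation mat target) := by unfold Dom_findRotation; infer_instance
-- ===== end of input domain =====

-- B replaces A's repeated matrix rebuilding by direct index-formula comparison of target
-- against the four rotations of mat (objective: simpler, no intermediate matrices built).

-- ===== PORT A =====
-- rotate(mat): for j in range(n): curr = [mat[i][j] for i in range(n)]; curr.reverse(); append
def pvRotate (n : Nat) (m : List (List Int)) : List (List Int) :=
  (List.range n).map (fun j => ((List.range n).map (fun i => (m.getD i []).getD j 0)).reverse)

def findRotation (mat : List (List Int)) (target : List (List Int)) : Bool :=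
  let n := mat.length
  -- for i in range(4): mat = rotate(mat); if mat == target: return True   (flag = early return)
  let st := (List.range 4).foldl
    (fun (st : List (List Int) × Bool) _ =>
      if st.2 then st
      else
        let m := pvRotate n st.1
        (m, m == target))
    (mat, false)
  st.2

-- ===== PORT B =====
def pvAt (m : List (List Int)) (i j : Nat) : Int := (m.getD i []).getD j 0

-- all(target[i][j] == f(i,j) for i in range(n) for j in range(n))
def pvAllEq (n : Nat) (target : List (List Int)) (f : Nat → Nat → Int) : Bool :=
  (List.range n).all (fun i => (List.range n).all (fun j => pvAt target i j == f i j))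

def findRotation_alt (mat : List (List Int)) (target : List (List Int)) : Bool :=
  let n := mat.length
  if target.length ≠ n || target.any (fun row => row.length ≠ n) then false
  else
    pvAllEq n target (fun i j => pvAt mat i j) ||
    pvAllEq n target (fun i j => pvAt mat (n - 1 - j) i) ||
    pvAllEq n target (fun i j => pvAt mat (n - 1 - i) (n - 1 - j)) ||
    pvAllEq n target (fun i j => pvAt mat j (n - 1 - i))

-- ===== PRECONDITION & SPEC =====
-- Pre_ excludes exactly the inputs on which A raises IndexError: some row of mat shorter than len(mat).
def Pre_findRotation (mat : List (List Int)) (target : List (List Int)) : Prop :=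
  ∀ row ∈ mat, mat.length ≤ row.length
instance (mat : List (List Int)) (target : List (List Int)) : Decidable (Pre_findRotation mat target) := by unfold Pre_findRotation; infer_instance

def pvWitness_findRotation : List (List Int) × List (List Int) := ([[1, 2], [3, 4]], [[3, 1], [4, 2]])

def Spec_findRotation (mat : List (List Int)) (target : List (List Int)) (out : Bool) : Prop := out = findRotation_alt mat target
instance (mat : List (List Int)) (target : List (List Int)) (out : Bool) : Decidable (Spec_findRotation mat target out) := by unfold Spec_findRotation; infer_instance

-- ===== CLAIM (what is proved, stated in full; the proofs are below) =====
def Claim_equal_findRotation : Prop := ∀ (mat : List (List Int)) (target : List (List Int)), Dom_findRotation mat target → Pre_findRotation mat target → Spec_findRotation mat target (findRotation mat target)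

-- ===== LEMMAS AND PROOFS =====

theorem rotate_length (n : Nat) (m : List (List Int)) : (pvRotate n m).length = n := by
  simp [pvRotate]

theorem rotate_row_length (n : Nat) (m : List (List Int)) :
    ∀ row ∈ pvRotate n m, row.length = n := by
  intro row hrow
  simp [pvRotate] at hrow
  obtain ⟨j, _, rfl⟩ := hrow
  simp

theorem rotate_at (n : Nat) (m : List (List Int)) {j k : Nat} (hj : j < n) (hk : k < n) :
    pvAt (pvRotate n m) j k = pvAt m (n - 1 - k) j := by
  have h1 : (pvRotate n m).getD j [] =
      ((List.range n).map (fun i => (m.getD i []).getD j 0)).reverse := by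
    rw [List.getD_eq_getElem _ _ (by simpa [pvRotate] using hj)]
    simp [pvRotate]
  have hlen : (((List.range n).map (fun i => (m.getD i []).getD j 0)).reverse).length = n := by simp
  rw [pvAt, h1, List.getD_eq_getElem _ _ (by simpa using hk)]
  rw [List.getElem_reverse]
  simp [pvAt]

-- matrix equality vs pointwise equality, for an n×n left-hand side
theorem eq_iff_pointwise (n : Nat) (m t : List (List Int))
    (hm : m.length = n) (hmr : ∀ row ∈ m, row.length = n) :
    (m = t) ↔ (t.length = n ∧ (∀ row ∈ t, row.length = n) ∧
      ∀ i < n, ∀ j < n, pvAt m i j = pvAt t i j) := by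
  constructor
  · rintro rfl
    exact ⟨hm, hmr, fun i _ j _ => rfl⟩
  · rintro ⟨ht, htr, hpt⟩
    apply List.ext_getElem (by omega)
    intro i hi1 hi2
    apply List.ext_getElem
    · rw [hmr _ (List.getElem_mem _), htr _ (List.getElem_mem _)]
    · intro j hj1 hj2
      have hjn : j < n := by rw [hmr _ (List.getElem_mem _)] at hj1; omega
      have := hpt i (by omega) j hjn
      simp only [pvAt] at this
      rw [List.getD_eq_getElem _ _ hi1, List.getD_eq_getElem _ _ hi2,
        List.getD_eq_getElem _ _ hj1, List.getD_eq_getElem _ _ hj2] at this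
      exact this

theorem allEq_iff (n : Nat) (t : List (List Int)) (f : Nat → Nat → Int) :
    pvAllEq n t f = true ↔ ∀ i < n, ∀ j < n, pvAt t i j = f i j := by
  simp [pvAllEq]

-- rotation k of A equals B's k-th index formula, given shape of target
theorem rot_eq_iff (n : Nat) (t : List (List Int)) (rot : List (List Int))
    (g : Nat → Nat → Int)
    (hrot : ∀ i < n, ∀ j < n, pvAt rot i j = g i j)
    (hlen : rot.length = n) (hrows : ∀ row ∈ rot, row.length = n) :
    (rot == t) = ((t.length == n && t.all (fun row => row.length == n)) &&
      pvAllEq n t g) := by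
  rw [Bool.eq_iff_iff, beq_iff_eq, eq_iff_pointwise n rot t hlen hrows]
  simp only [Bool.and_eq_true, beq_iff_eq, List.all_eq_true, allEq_iff]
  constructor
  · rintro ⟨h1, h2, h3⟩
    exact ⟨⟨h1, fun r hr => by simp [h2 r hr]⟩,
      fun i hi j hj => (h3 i hi j hj).symm.trans (hrot i hi j hj)⟩
  · rintro ⟨⟨h1, h2⟩, h3⟩
    exact ⟨h1, fun r hr => by simpa using h2 r hr,
      fun i hi j hj => (hrot i hi j hj).trans (h3 i hi j hj).symm⟩

-- unfolding A's 4-step loop with early-exit flag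
theorem loop4 (t : List (List Int)) (n : Nat) (m : List (List Int)) :
    ((List.range 4).foldl
      (fun (st : List (List Int) × Bool) _ =>
        if st.2 then st
        else
          let r := pvRotate n st.1
          (r, r == t))
      (m, false)).2
    = ((pvRotate n m == t) || (pvRotate n (pvRotate n m) == t) ||
       (pvRotate n (pvRotate n (pvRotate n m)) == t) ||
       (pvRotate n (pvRotate n (pvRotate n (pvRotate n m))) == t)) := by
  rw [show (List.range 4) = [0, 1, 2, 3] from rfl]
  simp only [List.foldl]
  by_cases h1 : pvRotate n m == t <;>
    by_cases h2 : pvRotate n (pvRotate n m) == t <;>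
    by_cases h3 : pvRotate n (pvRotate n (pvRotate n m)) == t <;>
    by_cases h4 : pvRotate n (pvRotate n (pvRotate n (pvRotate n m))) == t <;>
    simp [h1, h2, h3, h4]

-- ===== VERDICT (by name: the statement is the Claim_ definition above) =====
theorem findRotation_spec : Claim_equal_findRotation := by
  intro mat target _ hpre
  unfold Spec_findRotation
  have hA : findRotation mat target
      = ((pvRotate mat.length mat == target) ||
         (pvRotate mat.length (pvRotate mat.length mat) == target) ||
         (pvRotate mat.length (pvRotate mat.length (pvRotate mat.length mat)) == target) ||
         (pvRotate mat.length (pvRotate mat.length (pvRotate mat.length (pvRotate mat.length mat))) == target)) :=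
    loop4 target mat.length mat
  -- entry formulas for the four rotations
  have hA1 : ∀ i < mat.length, ∀ j < mat.length,
      pvAt (pvRotate mat.length mat) i j = pvAt mat (mat.length - 1 - j) i := by
    intro i hi j hj; exact rotate_at mat.length mat hi hj
  have hA2 : ∀ i < mat.length, ∀ j < mat.length,
      pvAt (pvRotate mat.length (pvRotate mat.length mat)) i j
        = pvAt mat (mat.length - 1 - i) (mat.length - 1 - j) := by
    intro i hi j hj
    rw [rotate_at mat.length _ hi hj, hA1 _ (by omega) _ hi]
  have hA3 : ∀ i < mat.length, ∀ j < mat.length,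
      pvAt (pvRotate mat.length (pvRotate mat.length (pvRotate mat.length mat))) i j
        = pvAt mat j (mat.length - 1 - i) := by
    intro i hi j hj
    rw [rotate_at mat.length _ hi hj, hA2 _ (by omega) _ hi]
    congr 1 <;> omega
  have hA4 : ∀ i < mat.length, ∀ j < mat.length,
      pvAt (pvRotate mat.length (pvRotate mat.length (pvRotate mat.length (pvRotate mat.length mat)))) i j
        = pvAt mat i j := by
    intro i hi j hj
    rw [rotate_at mat.length _ hi hj, hA3 _ (by omega) _ hi]
    congr 1 <;> omega
  rw [hA,
    rot_eq_iff mat.length target _ _ hA1 (rotate_length _ _) (rotate_row_length _ _),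
    rot_eq_iff mat.length target _ _ hA2 (rotate_length _ _) (rotate_row_length _ _),
    rot_eq_iff mat.length target _ _ hA3 (rotate_length _ _) (rotate_row_length _ _),
    rot_eq_iff mat.length target _ _ hA4 (rotate_length _ _) (rotate_row_length _ _)]
  show _ = findRotation_alt mat target
  simp only [findRotation_alt]
  by_cases hshape : (target.length == mat.length &&
      target.all fun row => row.length == mat.length) = true
  · have hcond : (decide (target.length ≠ mat.length) ||
        target.any fun row => decide (row.length ≠ mat.length)) = false := by
      simp only [Bool.and_eq_true, beq_iff_eq, List.all_eq_true] at hshape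
      simp only [Bool.or_eq_false_iff, decide_eq_false_iff_not, ne_eq, not_not,
        List.any_eq_false]
      exact ⟨hshape.1, fun r hr => by simpa using hshape.2 r hr⟩
    rw [hcond]
    rw [if_neg (by simp)]
    rw [hshape]
    cases pvAllEq mat.length target (fun i j => pvAt mat i j) <;>
      cases pvAllEq mat.length target (fun i j => pvAt mat (mat.length - 1 - j) i) <;>
      cases pvAllEq mat.length target
        (fun i j => pvAt mat (mat.length - 1 - i) (mat.length - 1 - j)) <;>
      cases pvAllEq mat.length target (fun i j => pvAt mat j (mat.length - 1 - i)) <;>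
      simp
  · have hcond : (decide (target.length ≠ mat.length) ||
        target.any fun row => decide (row.length ≠ mat.length)) = true := by
      simp only [Bool.and_eq_true, beq_iff_eq, List.all_eq_true, not_and_or] at hshape
      rcases hshape with h | h
      · simp [h]
      · push_neg at h; obtain ⟨row, hrow, hne⟩ := h
        refine Bool.or_eq_true_iff.2 (Or.inr ?_)
        exact List.any_eq_true.2 ⟨row, hrow, by simpa using hne⟩
    rw [hcond]
    have hS := eq_false_of_ne_true hshape
    simp [hS]
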